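-- pv_equiv track=rewrite | github.com/mouredev/retos-programacion-2023 | Retos/Reto #28 - EXPRESIÓN MATEMÁTICA [Media]/python/gonsomito.py | exp_math
-- ===== SOURCE A (Python) =====
-- def exp_math(ecuacion):
-- #iniciar variables y trocear ecuación
--     simbolos = ("+", "-", "*", "/", "%")
--     elementos=ecuacion.split(" ")
--     x = 0
--
-- #Si no da la talla o no hay suficientes elementos, no continuamos
--     if len(elementos) < 3 or len(elementos)%2 == 0:
--         return False
--
-- #recorre la lista para diferenciar números de simbolos (número símbolo número ...)
--     while x < len(elementos):
--         if x==0 or x%2 == 0: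
--             if elementos[x].replace(".","").isdigit() == False:
--                 return False
--         else:
--             if not(elementos[x] in simbolos) :
--                 return False
--         x = x + 1
--     return True
-- ===== SOURCE B (Python) =====
-- SIMBOLOS = {"+", "-", "*", "/", "%"}
--
-- def _es_num(e):
--     return e.replace(".", "").isdigit()
--
-- def _ok(elems):
--     # elems = number (symbol number)* ; consume two at a time
--     if not _es_num(elems[0]):
--         return False
--     if len(elems) == 1:
--         return True
--     return elems[1] in SIMBOLOS and _ok(elems[2:])
--
-- def exp_math(ecuacion):
--     elementos = ecuacion.split(" ")
--     if len(elementos) < 3 or len(elementos) % 2 == 0: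
--         return False
--     return _ok(elementos)
-- ===== Notes on version B (the rewrite author's own statement) =====
-- stated objective: alternative
-- what changed: A's single index-parity while-loop over the split tokens is replaced by a structural recursion that checks the leading number and then consumes (operator, number) pairs two at a time.
import Mathlib
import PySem

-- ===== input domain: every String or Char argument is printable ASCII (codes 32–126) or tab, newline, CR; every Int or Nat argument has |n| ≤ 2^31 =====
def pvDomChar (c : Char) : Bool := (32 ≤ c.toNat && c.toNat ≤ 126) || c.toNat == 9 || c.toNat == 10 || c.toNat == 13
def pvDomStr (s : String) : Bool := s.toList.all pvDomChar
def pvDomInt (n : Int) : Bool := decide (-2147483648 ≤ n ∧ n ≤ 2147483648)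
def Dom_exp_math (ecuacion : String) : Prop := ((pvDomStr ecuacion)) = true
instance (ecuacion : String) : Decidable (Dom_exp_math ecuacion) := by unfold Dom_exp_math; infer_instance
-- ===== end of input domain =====

-- B replaces A's index-parity while-loop by a recursion that consumes "number operator" pairs two at a time (objective: simpler decomposition, same cost).

-- ===== PORT A =====
def simbolosA : List String := ["+", "-", "*", "/", "%"]

-- elementos[x].replace(".","").isdigit()
def esNumA (e : String) : Bool := PySem.Str.strIsdigit (PySem.Str.replace e "." "")

-- the while loop: x runs from 0 to len(elementos)
def loopA (elems : List String) (x : Nat) : Bool :=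
  if h : x < elems.length then
    if (x == 0) || (x % 2 == 0) then
      if esNumA (elems[x]'h) == false then false else loopA elems (x + 1)
    else
      if !(simbolosA.contains (elems[x]'h)) then false else loopA elems (x + 1)
  else true
termination_by elems.length - x

def exp_math (ecuacion : String) : Bool :=
  let elementos := (PySem.Str.split? ecuacion " ").getD []
  if elementos.length < 3 || elementos.length % 2 == 0 then false
  else loopA elementos 0

-- ===== PORT B =====
def simbolosB : List String := ["+", "-", "*", "/", "%"]

def esNumB (e : String) : Bool := PySem.Str.strIsdigit (PySem.Str.replace e "." "")

-- _ok: first element a number, then (operator number)* consumed two at a time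
def okB : List String → Bool
  | [] => true                      -- unreachable from exp_math_alt (length ≥ 3 there)
  | [e] => if !esNumB e then false else true
  | e :: op :: rest =>
      if !esNumB e then false
      else simbolosB.contains op && okB rest

def exp_math_alt (ecuacion : String) : Bool :=
  let elementos := (PySem.Str.split? ecuacion " ").getD []
  if elementos.length < 3 || elementos.length % 2 == 0 then false
  else okB elementos

-- ===== PRECONDITION & SPEC =====
def Spec_exp_math (ecuacion : String) (out : Bool) : Prop := out = exp_math_alt ecuacion
instance (ecuacion : String) (out : Bool) : Decidable (Spec_exp_math ecuacion out) := by unfold Spec_exp_math; infer_instance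

-- ===== CLAIM (what is proved, stated in full; the proofs are below) =====
def Claim_equal_exp_math : Prop := ∀ (ecuacion : String), Dom_exp_math ecuacion → Spec_exp_math ecuacion (exp_math ecuacion)

-- ===== LEMMAS AND PROOFS =====

-- skipping two leading elements shifts the loop index by two (parity is preserved)
theorem loopA_shift (a b : String) (rest : List String) :
    ∀ n k, rest.length - k ≤ n → loopA (a :: b :: rest) (k + 2) = loopA rest k := by
  intro n
  induction n with
  | zero =>
    intro k hk
    rw [loopA]
    conv_rhs => rw [loopA]
    have h1 : ¬ (k + 2 < (a :: b :: rest).length) := by simp; omega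
    have h2 : ¬ (k < rest.length) := by omega
    simp [h1, h2]
  | succ n ih =>
    intro k hk
    rw [loopA]
    conv_rhs => rw [loopA]
    by_cases hlt : k < rest.length
    · have h1 : k + 2 < (a :: b :: rest).length := by simp; omega
      have hget : (a :: b :: rest)[k + 2]'(by simpa using h1) = rest[k]'hlt := by simp
      have hpar : (((k + 2 : Nat) == 0) || ((k + 2) % 2 == 0)) = ((k == 0) || (k % 2 == 0)) := by
        rcases Nat.even_or_odd k with he | ho
        · have h0 : k % 2 = 0 := Nat.even_iff.mp he
          simp [Nat.add_mod_right, h0]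
        · have h1' : k % 2 = 1 := Nat.odd_iff.mp ho
          have hk0 : k ≠ 0 := by omega
          simp [Nat.add_mod_right, h1', hk0]
      have hrec : loopA (a :: b :: rest) (k + 2 + 1) = loopA rest (k + 1) :=
        ih (k + 1) (by omega)
      simp only [h1, dif_pos, hget, hpar]
      split_ifs <;> simp [hrec]
    · have h1 : ¬ (k + 2 < (a :: b :: rest).length) := by simp; omega
      simp [h1, hlt]

theorem loopA_eq_okB : (elems : List String) → loopA elems 0 = okB elems
  | [] => by rw [loopA]; simp [okB]
  | [e] => by
    rw [loopA]
    have h0 : (0 : Nat) < [e].length := by simp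
    rw [loopA]
    simp [okB, esNumA, esNumB]
  | e :: op :: rest => by
    have ih := loopA_eq_okB rest
    rw [loopA]
    have h0 : (0 : Nat) < (e :: op :: rest).length := by simp
    rw [loopA]
    have hsh : loopA (e :: op :: rest) (0 + 2) = loopA rest 0 :=
      loopA_shift e op rest rest.length 0 (by omega)
    simp only [okB, esNumA, esNumB] at *
    simp [hsh, ih]
    cases PySem.Str.strIsdigit (PySem.Str.replace e "." "") <;>
      cases hc : simbolosA.contains op <;>
        simp_all [simbolosA, simbolosB]

-- ===== VERDICT (by name: the statement is the Claim_ definition above) =====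
theorem exp_math_spec : Claim_equal_exp_math := by
  intro ecuacion _
  unfold Spec_exp_math exp_math exp_math_alt
  simp only []
  split_ifs with h
  · rfl
  · exact loopA_eq_okB _
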